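-- pv_equiv track=rewrite | github.com/populationgenomics/sv-workflows | str/associatr/fine-mapping/remove_STR_indels.py | generate_truncated_motifs
-- ===== SOURCE A (Python) =====
-- def generate_truncated_motifs(indel, motif2):
--     """
--     Generate all possible truncated motifs of a given length from a motif.
--
--     e.g. motif 'ATCC' with indel 'GT' should return 'AT', 'TC', 'CC', 'CA'.
--
--     """
--     truncated_motifs = []
--     indel_size = len(indel)
--     motif2_size = len(motif2)
--     for i in range(motif2_size):
--         truncated_motif = motif2[i:] + motif2[:i]  # Wrap around if necessary
--         truncated_motif = truncated_motif[:indel_size]  # Truncate to match indel size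
--         truncated_motifs.append(truncated_motif)
--     return truncated_motifs
-- ===== SOURCE B (Python) =====
-- def generate_truncated_motifs(indel, motif2):
--     k = len(indel)
--     out = []
--     cur = motif2
--     for _ in range(len(motif2)):
--         out.append(cur[:k])
--         cur = cur[1:] + cur[:1]
--     return out
-- ===== Notes on version B (the rewrite author's own statement) =====
-- stated objective: alternative
-- what changed: B is a single accumulator pass over one evolving state: it keeps the current rotation as a string, emits its first len(indel) characters, and advances by moving one character from front to back, instead of recomputing each rotation from scratch by index with two position-dependent slices per step.
import Mathlib
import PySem

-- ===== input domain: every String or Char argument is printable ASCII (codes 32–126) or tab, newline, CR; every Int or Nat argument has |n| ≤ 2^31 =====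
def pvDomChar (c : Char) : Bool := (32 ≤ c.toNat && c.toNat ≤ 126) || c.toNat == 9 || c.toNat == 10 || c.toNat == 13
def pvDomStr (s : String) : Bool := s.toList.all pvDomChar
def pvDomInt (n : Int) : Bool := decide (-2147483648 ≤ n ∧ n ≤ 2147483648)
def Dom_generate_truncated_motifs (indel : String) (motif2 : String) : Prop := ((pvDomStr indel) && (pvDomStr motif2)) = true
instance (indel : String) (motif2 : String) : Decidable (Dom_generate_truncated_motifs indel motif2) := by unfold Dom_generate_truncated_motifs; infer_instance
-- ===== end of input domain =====

-- B keeps one evolving rotation as its state, emitting its first len(indel)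
-- characters and then moving one character from front to back each step, instead
-- of recomputing each rotation from scratch by index; objective: alternative.

-- ===== PORT A =====
-- literal transliteration of A: for i in range(len(motif2)):
--   append ((motif2[i:] + motif2[:i])[:len(indel)])
def generate_truncated_motifs (indel : String) (motif2 : String) : List String :=
  let l := motif2.toList
  let indel_size : Int := (indel.toList.length : Int)
  let motif2_size : Int := (l.length : Int)
  (PySem.List.pyRange 0 motif2_size 1).foldl
    (fun acc i =>
      acc ++ [String.mk (PySem.List.slice
        (PySem.List.slice l (some i) none ++ PySem.List.slice l none (some i))
        none (some indel_size))]) []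

-- ===== PORT B =====
-- literal transliteration of Source B: out.append(cur[:k]); cur = cur[1:] + cur[:1],
-- folding the pair (cur, out) over range(len(motif2))
def generate_truncated_motifs_alt (indel : String) (motif2 : String) : List String :=
  let k : Int := (indel.toList.length : Int)
  ((List.range motif2.toList.length).foldl
    (fun (st : List Char × List String) (_ : Nat) =>
      (PySem.List.slice st.1 (some 1) none ++ PySem.List.slice st.1 none (some 1),
       st.2 ++ [String.mk (PySem.List.slice st.1 none (some k))]))
    (motif2.toList, [])).2

-- ===== PRECONDITION & SPEC =====
def Spec_generate_truncated_motifs (indel : String) (motif2 : String) (out : List String) : Prop := out = generate_truncated_motifs_alt indel motif2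
instance (indel : String) (motif2 : String) (out : List String) : Decidable (Spec_generate_truncated_motifs indel motif2 out) := by unfold Spec_generate_truncated_motifs; infer_instance

-- ===== CLAIM (what is proved, stated in full; the proofs are below) =====
def Claim_equal_generate_truncated_motifs : Prop := ∀ (indel : String) (motif2 : String), Dom_generate_truncated_motifs indel motif2 → Spec_generate_truncated_motifs indel motif2 (generate_truncated_motifs indel motif2)

-- ===== LEMMAS AND PROOFS =====

-- one front-to-back step is List.rotate by 1
theorem rotStep_eq_rotate (x : List Char) :
    PySem.List.slice x (some 1) none ++ PySem.List.slice x none (some 1) = x.rotate 1 := by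
  rw [show (1 : Int) = ((1 : Nat) : Int) from rfl,
      PySem.List.slice_from_natCast, PySem.List.slice_to_natCast]
  cases x with
  | nil => simp
  | cons h t =>
      rw [List.rotate_eq_drop_append_take (by simp)]

-- the loop invariant: after n steps the state is (rotation by n, the n outputs)
theorem loop_spec (k : Int) (c : List Char) (n : Nat) :
    (List.range n).foldl
      (fun (st : List Char × List String) (_ : Nat) =>
        (PySem.List.slice st.1 (some 1) none ++ PySem.List.slice st.1 none (some 1),
         st.2 ++ [String.mk (PySem.List.slice st.1 none (some k))]))
      (c, [])
    = (c.rotate n,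
       (List.range n).map (fun i => String.mk (PySem.List.slice (c.rotate i) none (some k)))) := by
  induction n with
  | zero => simp
  | succ n ih =>
      rw [List.range_succ, List.foldl_append, ih, List.map_append]
      simp only [List.foldl_cons, List.foldl_nil]
      rw [rotStep_eq_rotate, List.rotate_rotate]
      simp

-- ===== VERDICT (by name: the statement is the Claim_ definition above) =====
theorem generate_truncated_motifs_spec : Claim_equal_generate_truncated_motifs := by
  intro indel motif2 _
  unfold Spec_generate_truncated_motifs generate_truncated_motifs generate_truncated_motifs_alt
  dsimp only
  rw [loop_spec]
  simp only [PySem.List.pyRange_one, PySem.List.foldl_append_singleton_eq_map, List.map_map, List.nil_append]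
  rw [show (((motif2.toList.length : Int)) - 0).toNat = motif2.toList.length by omega]
  apply List.map_congr_left
  intro i hi
  have hilt : i < motif2.toList.length := List.mem_range.mp hi
  simp only [Function.comp, zero_add]
  rw [PySem.List.slice_from_natCast,
      List.rotate_eq_drop_append_take (le_of_lt hilt)]
  simp [PySem.List.slice_to_natCast]
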